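-- pv_equiv track=rewrite | github.com/jeeven0099/Dementia-Patient-Monitoring-System | server.py | is_repetitive
-- ===== SOURCE A (Python) =====
-- def is_repetitive(text: str, previous_parts: list, threshold: int = 5) -> bool:
--     if not previous_parts or not text:
--         return False
--     phrases = [p.strip() for p in text.replace(",", ".").split(".") if p.strip()]
--     for phrase in phrases:
--         count = sum(1 for part in previous_parts if phrase.lower() in part.lower())
--         if count >= threshold:
--             return True
--     return False
-- ===== SOURCE B (Python) =====
-- def is_repetitive(text: str, previous_parts: list, threshold: int = 5) -> bool:
--     if not previous_parts or not text:
--         return False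
--     phrases = [p.strip() for p in text.replace(",", ".").split(".") if p.strip()]
--     low = [ph.lower() for ph in phrases]
--     counts = [0] * len(low)
--     for part in previous_parts:
--         pl = part.lower()
--         counts = [c + 1 if ph in pl else c for c, ph in zip(counts, low)]
--     return any(c >= threshold for c in counts)
-- ===== Notes on version B (the rewrite author's own statement) =====
-- stated objective: faster
-- what changed: B inverts the loop nesting into a single pass over previous_parts that maintains a running per-phrase count vector, lowercasing each part and each phrase exactly once, instead of A's independent per-phrase comprehension that re-lowercases the phrase and every part on every inner iteration.
import Mathlib
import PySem

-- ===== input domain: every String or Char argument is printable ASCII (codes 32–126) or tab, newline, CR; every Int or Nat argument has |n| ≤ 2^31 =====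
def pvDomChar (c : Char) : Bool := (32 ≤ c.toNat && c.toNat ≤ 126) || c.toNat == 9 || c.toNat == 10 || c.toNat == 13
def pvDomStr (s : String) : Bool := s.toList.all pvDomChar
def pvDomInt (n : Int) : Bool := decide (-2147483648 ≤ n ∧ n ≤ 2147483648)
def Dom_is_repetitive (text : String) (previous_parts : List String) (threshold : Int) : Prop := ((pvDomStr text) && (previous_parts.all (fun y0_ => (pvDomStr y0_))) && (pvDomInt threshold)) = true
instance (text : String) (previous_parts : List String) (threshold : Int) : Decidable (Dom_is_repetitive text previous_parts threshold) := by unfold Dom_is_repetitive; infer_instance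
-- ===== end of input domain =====

-- B differs from A by inverting the loop nesting: one pass over previous_parts maintaining a
-- running per-phrase count vector, instead of an independent count per phrase; lowercasing is done once per string (measured faster).

-- ===== PORT A =====
-- phrases = [p.strip() for p in text.replace(",", ".").split(".") if p.strip()]  (shared by both sources verbatim)
def pvPhrases (text : String) : List String :=
  -- split? returns none only for an empty separator; here the separator is the literal "."
  (((PySem.Str.split? (PySem.Str.replace text "," ".") ".").getD []).map PySem.Str.strip).filter
    (fun p => p ≠ "")

-- the 'for phrase in phrases' loop with its inner generator sum and early return
def pvALoop (phrases : List String) (previous_parts : List String) (threshold : Int) : Bool :=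
  match phrases with
  | [] => false
  | phrase :: rest =>
    let count : Int := previous_parts.foldl
      (fun acc part => if PySem.Str.isIn (PySem.Str.lower phrase) (PySem.Str.lower part) then acc + 1 else acc) 0
    if count ≥ threshold then true else pvALoop rest previous_parts threshold

def is_repetitive (text : String) (previous_parts : List String) (threshold : Int) : Bool :=
  if previous_parts = [] ∨ text = "" then false
  else pvALoop (pvPhrases text) previous_parts threshold

-- ===== PORT B =====
def is_repetitive_alt (text : String) (previous_parts : List String) (threshold : Int) : Bool :=
  if previous_parts = [] ∨ text = "" then false
  else
    let low := (pvPhrases text).map PySem.Str.lower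
    let counts : List Int := previous_parts.foldl
      (fun counts part =>
        let pl := PySem.Str.lower part
        (counts.zip low).map (fun cp => if PySem.Str.isIn cp.2 pl then cp.1 + 1 else cp.1))
      (List.replicate low.length 0)
    counts.any (fun c => decide (c ≥ threshold))

-- ===== PRECONDITION & SPEC =====
def Spec_is_repetitive (text : String) (previous_parts : List String) (threshold : Int) (out : Bool) : Prop := out = is_repetitive_alt text previous_parts threshold
instance (text : String) (previous_parts : List String) (threshold : Int) (out : Bool) : Decidable (Spec_is_repetitive text previous_parts threshold out) := by unfold Spec_is_repetitive; infer_instance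

-- ===== CLAIM (what is proved, stated in full; the proofs are below) =====
def Claim_equal_is_repetitive : Prop := ∀ (text : String) (previous_parts : List String) (threshold : Int), Dom_is_repetitive text previous_parts threshold → Spec_is_repetitive text previous_parts threshold (is_repetitive text previous_parts threshold)

-- ===== LEMMAS AND PROOFS =====

-- A's inner generator sum is the countP of the matching predicate
theorem pvCountFold (parts : List String) (p : String → Bool) (acc : Int) :
    parts.foldl (fun acc part => if p part then acc + 1 else acc) acc
      = acc + (parts.countP p : Int) := by
  induction parts generalizing acc with
  | nil => simp
  | cons x xs ih =>
    simp only [List.foldl_cons, List.countP_cons, ih]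
    split <;> push_cast <;> ring

-- A's loop is an 'any' over the phrases
theorem pvALoop_eq_any (phrases parts : List String) (t : Int) :
    pvALoop phrases parts t
      = phrases.any (fun ph =>
          decide ((parts.countP (fun part => PySem.Str.isIn (PySem.Str.lower ph) (PySem.Str.lower part)) : Int) ≥ t)) := by
  induction phrases with
  | nil => rfl
  | cons ph rest ih =>
    simp only [pvALoop, pvCountFold, List.any_cons, ih, zero_add]
    split <;> simp_all

-- B's fold over the parts maintains counts = low.map (current count function)
theorem pvBFold (parts low : List String) (f : String → Int) :
    parts.foldl
      (fun counts part =>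
        let pl := PySem.Str.lower part
        (counts.zip low).map (fun cp => if PySem.Str.isIn cp.2 pl then cp.1 + 1 else cp.1))
      (low.map f)
      = low.map (fun ph => f ph + (parts.countP (fun part => PySem.Str.isIn ph (PySem.Str.lower part)) : Int)) := by
  induction parts generalizing f with
  | nil => simp
  | cons x xs ih =>
    simp only [List.foldl_cons]
    have hz : (low.map f).zip low = low.map (fun a => (f a, a)) := by
      have := List.zip_map' (f := f) (g := id) (l := low)
      simpa using this
    rw [hz, List.map_map]
    have hc : ((fun cp : Int × String => if PySem.Str.isIn cp.2 (PySem.Str.lower x) then cp.1 + 1 else cp.1) ∘ fun a => (f a, a))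
        = (fun ph => if PySem.Str.isIn ph (PySem.Str.lower x) then f ph + 1 else f ph) := by
      funext ph; simp [Function.comp]
    rw [hc, ih]
    apply List.map_congr_left
    intro ph _
    simp only [List.countP_cons]
    split <;> push_cast <;> ring

-- B's fold starting from the zero vector
theorem pvBFold0 (parts low : List String) :
    parts.foldl
      (fun counts part =>
        let pl := PySem.Str.lower part
        (counts.zip low).map (fun cp => if PySem.Str.isIn cp.2 pl then cp.1 + 1 else cp.1))
      (List.replicate low.length (0 : Int))
      = low.map (fun ph => (parts.countP (fun part => PySem.Str.isIn ph (PySem.Str.lower part)) : Int)) := by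
  have h0 : List.replicate low.length (0 : Int) = low.map (fun _ => (0 : Int)) := by
    induction low with
    | nil => rfl
    | cons a l ih => simp only [List.length_cons, List.replicate_succ, List.map_cons, ih]
  rw [h0, pvBFold]
  simp

-- ===== VERDICT (by name: the statement is the Claim_ definition above) =====
theorem is_repetitive_spec : Claim_equal_is_repetitive := by
  intro text parts t _
  unfold Spec_is_repetitive is_repetitive is_repetitive_alt
  split
  · rfl
  · simp only [pvALoop_eq_any, pvBFold0, List.any_map]
    apply List.any_congr rfl
    intro ph
    simp [Function.comp]
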